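-- pv_equiv track=rewrite | github.com/ljmarquezz/Python_exercises | cals.py | solution
-- ===== SOURCE A (Python) =====
-- def solution (cals, d:int, min:int, max:int):
--     day_count = 0
--     total = 0
--     points = 0
--     for cal in cals:
--         total += cal
--         day_count += 1
--         if day_count == d:
--             if total < min:
--                 points -= 1
--             elif total > max:
--                 points += 1
--             day_count = 0
--             total =0
--     return points
-- ===== SOURCE B (Python) =====
-- def solution(cals, d: int, min: int, max: int):
--     if d <= 0:
--         return 0
--     points = 0
--     while len(cals) >= d:
--         s = sum(cals[:d])
--         if s < min:
--             points -= 1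
--         elif s > max:
--             points += 1
--         cals = cals[d:]
--     return points
-- ===== Notes on version B (the rewrite author's own statement) =====
-- stated objective: alternative
-- what changed: B guards d<=0 and then consumes the list chunk-by-chunk (slice the next d-element window, sum it, score it, drop it) instead of A's single element-wise pass with a day counter and running total that it resets by hand.
import Mathlib
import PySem

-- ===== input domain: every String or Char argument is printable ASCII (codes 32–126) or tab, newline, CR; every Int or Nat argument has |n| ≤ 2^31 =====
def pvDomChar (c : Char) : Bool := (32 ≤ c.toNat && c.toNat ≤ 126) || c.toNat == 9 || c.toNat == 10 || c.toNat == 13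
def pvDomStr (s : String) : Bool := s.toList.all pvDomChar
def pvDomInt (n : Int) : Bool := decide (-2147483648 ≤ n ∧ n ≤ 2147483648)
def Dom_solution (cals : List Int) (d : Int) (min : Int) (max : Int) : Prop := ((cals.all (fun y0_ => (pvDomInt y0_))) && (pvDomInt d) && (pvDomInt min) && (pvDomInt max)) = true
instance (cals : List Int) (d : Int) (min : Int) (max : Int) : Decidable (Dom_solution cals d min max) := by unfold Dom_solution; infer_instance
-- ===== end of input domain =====

-- B replaces A's element-wise pass (day counter + running total reset by hand) by a
-- chunk-by-chunk loop: guard d <= 0, then repeatedly slice the next d-element window,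
-- sum and score it, and drop it.  Objective: alternative decomposition, same cost.

-- ===== PORT A =====
-- loop body of A: state = (day_count, total, points)
def solStep (d min max : Int) (st : Int × Int × Int) (cal : Int) : Int × Int × Int :=
  let total := st.2.1 + cal
  let day_count := st.1 + 1
  if day_count = d then
    (0, 0, if total < min then st.2.2 - 1 else if total > max then st.2.2 + 1 else st.2.2)
  else
    (day_count, total, st.2.2)

def solution (cals : List Int) (d : Int) (min : Int) (max : Int) : Int :=
  (cals.foldl (solStep d min max) (0, 0, 0)).2.2

-- ===== PORT B =====
-- B's while loop; 'hd : 1 ≤ d' justifies termination (B only enters the loop after the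
-- d <= 0 guard).  cals[:d] = take d.toNat and cals[d:] = drop d.toNat are exact for 1 ≤ d.
def solAltLoop (d min max : Int) (hd : 1 ≤ d) (cals : List Int) (points : Int) : Int :=
  if h : d ≤ (cals.length : Int) then
    let s := (cals.take d.toNat).sum
    solAltLoop d min max hd (cals.drop d.toNat)
      (if s < min then points - 1 else if s > max then points + 1 else points)
  else
    points
termination_by cals.length
decreasing_by
  simp only [List.length_drop]
  omega

def solution_alt (cals : List Int) (d : Int) (min : Int) (max : Int) : Int :=
  if hd : d ≤ 0 then 0
  else solAltLoop d min max (by omega) cals 0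

-- ===== PRECONDITION & SPEC =====
def Spec_solution (cals : List Int) (d : Int) (min : Int) (max : Int) (out : Int) : Prop := out = solution_alt cals d min max
instance (cals : List Int) (d : Int) (min : Int) (max : Int) (out : Int) : Decidable (Spec_solution cals d min max out) := by unfold Spec_solution; infer_instance

-- ===== CLAIM (what is proved, stated in full; the proofs are below) =====
def Claim_equal_solution : Prop := ∀ (cals : List Int) (d : Int) (min : Int) (max : Int), Dom_solution cals d min max → Spec_solution cals d min max (solution cals d min max)

-- ===== LEMMAS AND PROOFS =====

-- once day_count ≥ d, the check 'day_count == d' never fires again: points frozen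
theorem foldl_nohit (d min max : Int) :
    ∀ (xs : List Int) (c t p : Int), d ≤ c →
      (xs.foldl (solStep d min max) (c, t, p)).2.2 = p := by
  intro xs
  induction xs with
  | nil => intro c t p _; rfl
  | cons x xs ih =>
    intro c t p hc
    have hne : ¬ (c + 1 = d) := by omega
    simp only [List.foldl_cons, solStep, hne, if_false]
    exact ih (c + 1) (t + x) p (by omega)

-- a full window of exactly d - c remaining elements: state resets, points scored once
theorem foldl_window (d min max : Int) :
    ∀ (ys : List Int) (c t p : Int), c + ys.length = d → ys ≠ [] →
      ys.foldl (solStep d min max) (c, t, p) =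
        (0, 0, if t + ys.sum < min then p - 1 else if t + ys.sum > max then p + 1 else p) := by
  intro ys
  induction ys with
  | nil => intro c t p _ hne; exact absurd rfl hne
  | cons y ys ih =>
    intro c t p hlen _
    by_cases hy : ys = []
    · subst hy
      have hd : c + 1 = d := by simpa using hlen
      simp [solStep, hd]
    · have hne : ¬ (c + 1 = d) := by
        have : 1 ≤ (ys.length : Int) := by
          have := List.length_pos_iff.mpr hy
          omega
        simp only [List.length_cons] at hlen
        push_cast at hlen
        omega
      simp only [List.foldl_cons, solStep, hne, if_false]
      have := ih (c + 1) (t + y) p (by simp only [List.length_cons] at hlen; push_cast at hlen ⊢; omega) hy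
      rw [this]
      simp only [List.sum_cons]
      ring_nf

-- fewer than d - c remaining elements: the check never fires, points unchanged
theorem foldl_short (d min max : Int) :
    ∀ (ys : List Int) (c t p : Int), c + ys.length < d →
      (ys.foldl (solStep d min max) (c, t, p)).2.2 = p := by
  intro ys
  induction ys with
  | nil => intro c t p _; rfl
  | cons y ys ih =>
    intro c t p hlen
    simp only [List.length_cons] at hlen
    push_cast at hlen
    have hne : ¬ (c + 1 = d) := by omega
    simp only [List.foldl_cons, solStep, hne, if_false]
    exact ih (c + 1) (t + y) p (by omega)

theorem foldl_eq_loop (d min max : Int) (hd : 1 ≤ d) :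
    ∀ (n : Nat) (xs : List Int) (p : Int), xs.length ≤ n →
      (xs.foldl (solStep d min max) (0, 0, p)).2.2 = solAltLoop d min max hd xs p := by
  intro n
  induction n with
  | zero =>
    intro xs p hn
    have hx : xs = [] := List.length_eq_zero_iff.mp (Nat.le_zero.mp hn)
    subst hx
    rw [solAltLoop, dif_neg (by simp; omega)]
    rfl
  | succ n ih =>
    intro xs p hn
    rw [solAltLoop]
    by_cases h : d ≤ (xs.length : Int)
    · simp only [h, dif_pos]
      have htake : (xs.take d.toNat).length = d.toNat := by
        rw [List.length_take]
        omega
      have hsplit : xs = xs.take d.toNat ++ xs.drop d.toNat := (List.take_append_drop _ _).symm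
      conv_lhs => rw [hsplit]
      rw [List.foldl_append]
      rw [foldl_window d min max (xs.take d.toNat) 0 0 p (by rw [htake]; omega)
        (by intro hnil; rw [hnil] at htake; simp at htake; omega)]
      simp only [Int.zero_add]
      exact ih (xs.drop d.toNat) _ (by simp only [List.length_drop]; omega)
    · simp only [h, dif_neg, not_false_iff]
      exact foldl_short d min max xs 0 0 p (by omega)

-- ===== VERDICT (by name: the statement is the Claim_ definition above) =====
theorem solution_spec : Claim_equal_solution := by
  intro cals d min max _
  unfold Spec_solution solution solution_alt
  by_cases hd : d ≤ 0
  · simp only [hd, dif_pos]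
    exact foldl_nohit d min max cals 0 0 0 hd
  · simp only [hd, dif_neg, not_false_iff]
    exact foldl_eq_loop d min max (by omega) cals.length cals 0 le_rfl
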